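-- pv_equiv track=rewrite | github.com/jkhwang150/CodingTest | python/level0/level0_60.py | solution
-- ===== SOURCE A (Python) =====
-- def solution(chicken):
--     answer = -1
--     count = 0
--     cou = 0
--     while(chicken!=0):
--         chicken -=1
--         count+=1
--         if(count==10):
--             chicken+=1
--             cou+=1
--             count=0
--     return cou
-- ===== SOURCE B (Python) =====
-- def solution(chicken):
--     return 0 if chicken == 0 else (chicken - 1) // 9
-- ===== Notes on version B (the rewrite author's own statement) =====
-- stated objective: faster
-- what changed: Replaces the one-by-one simulation loop (decrement a counter, reset every 10th step) by the closed form (chicken-1)//9 bonus chickens, computed in O(1).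
import Mathlib
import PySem

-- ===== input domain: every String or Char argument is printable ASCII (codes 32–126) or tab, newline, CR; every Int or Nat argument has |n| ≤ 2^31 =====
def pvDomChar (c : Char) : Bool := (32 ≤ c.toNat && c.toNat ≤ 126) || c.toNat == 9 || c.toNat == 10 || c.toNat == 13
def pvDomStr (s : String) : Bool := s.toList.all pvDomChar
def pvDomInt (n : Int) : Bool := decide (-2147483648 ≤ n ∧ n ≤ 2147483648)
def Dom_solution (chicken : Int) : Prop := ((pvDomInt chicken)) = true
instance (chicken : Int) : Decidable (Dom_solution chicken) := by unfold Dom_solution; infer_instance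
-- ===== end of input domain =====

-- B replaces A's one-by-one simulation loop by the closed form (chicken-1)//9; objective: faster (O(1) vs O(n)).


-- ===== PORT A =====
-- fuel-bounded transliteration of A's while loop; 2*chicken+10 fuel is proved
-- sufficient for every chicken ≥ 0 (Pre_), so the fuel never runs out on Pre_.
def solutionLoop (fuel : Nat) (chicken count cou : Int) : Int :=
  match fuel with
  | 0 => cou
  | f + 1 =>
    if chicken ≠ 0 then
      let chicken' := chicken - 1
      let count' := count + 1
      if count' = 10 then solutionLoop f (chicken' + 1) 0 (cou + 1)
      else solutionLoop f chicken' count' cou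
    else cou

def solution (chicken : Int) : Int :=
  -- answer = -1 is dead in A; count = 0, cou = 0
  solutionLoop (2 * chicken + 10).toNat chicken 0 0

-- ===== PORT B =====
def solution_alt (chicken : Int) : Int :=
  if chicken = 0 then 0 else PySem.Int.floordiv (chicken - 1) 9

-- ===== PRECONDITION & SPEC =====
-- A's while loop never terminates for chicken < 0 (the counter drifts away from 0), so those inputs are excluded.
def Pre_solution (chicken : Int) : Prop := 0 ≤ chicken
instance (chicken : Int) : Decidable (Pre_solution chicken) := by unfold Pre_solution; infer_instance
def pvWitness_solution : Int := (23)

def Spec_solution (chicken : Int) (out : Int) : Prop := out = solution_alt chicken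
instance (chicken : Int) (out : Int) : Decidable (Spec_solution chicken out) := by unfold Spec_solution; infer_instance

-- ===== CLAIM (what is proved, stated in full; the proofs are below) =====
def Claim_equal_solution : Prop := ∀ (chicken : Int), Dom_solution chicken → Pre_solution chicken → Spec_solution chicken (solution chicken)

-- ===== LEMMAS AND PROOFS =====

-- Invariant: from a state (c, count, cou) with enough fuel, the loop returns
-- cou + (if c = 0 then 0 else (c + count - 1) / 9).
theorem solutionLoop_closed (fuel : Nat) :
    ∀ (c count cou : Int), 0 ≤ c → 0 ≤ count → count ≤ 9 →
      (2 * c + count + 1 ≤ fuel) →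
      solutionLoop fuel c count cou
        = cou + (if c = 0 then 0 else (c + count - 1) / 9) := by
  induction fuel with
  | zero => intro c count cou hc hc0 hc9 hf; omega
  | succ f ih =>
    intro c count cou hc hc0 hc9 hf
    by_cases h0 : c = 0
    · simp [solutionLoop, h0]
    · have hc1 : 1 ≤ c := by omega
      simp only [solutionLoop]
      rw [if_pos (show c ≠ 0 from h0)]
      by_cases h10 : count + 1 = 10
      · have hcount : count = 9 := by omega
        rw [if_pos h10]
        have := ih (c - 1 + 1) 0 (cou + 1) (by omega) (by omega) (by omega) (by omega)
        rw [this, if_neg (by omega : ¬ c - 1 + 1 = 0), if_neg h0]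
        omega
      · rw [if_neg h10]
        have := ih (c - 1) (count + 1) cou (by omega) (by omega) (by omega) (by omega)
        rw [this]
        by_cases h1 : c = 1
        · subst h1; norm_num; omega
        · rw [if_neg (by omega), if_neg h0]
          omega

-- ===== VERDICT (by name: the statement is the Claim_ definition above) =====
theorem solution_spec : Claim_equal_solution := by
  intro chicken _ hpre
  unfold Spec_solution solution solution_alt
  rw [solutionLoop_closed _ chicken 0 0 hpre le_rfl (by omega) (by omega)]
  by_cases h0 : chicken = 0
  · simp [h0]
  · rw [if_neg h0, if_neg h0, PySem.Int.floordiv_eq_ediv_of_pos (by omega)]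
    norm_num
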